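-- pv_equiv track=rewrite | github.com/laplasjan/Commutative-_Algebra | kombi.py | zewnetrzna
-- ===== SOURCE A (Python) =====
-- import itertools as it
--
-- def zewnetrzna(A, k):
--     max_len = max(len(sublist) for sublist in A)
--     wyniki = []
--
--     for kombinacja in it.combinations(range(len(A)), k):
--         summed_sublist = []
--         for j in range(max_len):
--             sublist_sum = sum(
--                 A[i][j] if j < len(A[i]) else 0
--                 for i in kombinacja
--             )
--             summed_sublist.append(sublist_sum)
--
--         wyniki.append(summed_sublist)
--
--     return wyniki
-- ===== SOURCE B (Python) =====
-- def zewnetrzna(A, k):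
--     max_len = max(len(row) for row in A)
--     padded = [row + [0] * (max_len - len(row)) for row in A]
--
--     def rec(i, need, cur):
--         if need == 0:
--             return [cur]
--         if len(padded) - i < need:
--             return []
--         taken = rec(i + 1, need - 1, [c + v for c, v in zip(cur, padded[i])])
--         skipped = rec(i + 1, need, cur)
--         return taken + skipped
--
--     return rec(0, k, [0] * max_len)
-- ===== Notes on version B (the rewrite author's own statement) =====
-- stated objective: alternative
-- what changed: Replaces A's per-combination re-scanning (for each index tuple from itertools.combinations, summing each of the max_len columns over the k selected rows) by a pruned recursive lexicographic combination generation over rows padded once to equal length, carrying an incremental running column-sum vector (one vector add per recursion step instead of k adds per column per combination).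
import Mathlib
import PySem

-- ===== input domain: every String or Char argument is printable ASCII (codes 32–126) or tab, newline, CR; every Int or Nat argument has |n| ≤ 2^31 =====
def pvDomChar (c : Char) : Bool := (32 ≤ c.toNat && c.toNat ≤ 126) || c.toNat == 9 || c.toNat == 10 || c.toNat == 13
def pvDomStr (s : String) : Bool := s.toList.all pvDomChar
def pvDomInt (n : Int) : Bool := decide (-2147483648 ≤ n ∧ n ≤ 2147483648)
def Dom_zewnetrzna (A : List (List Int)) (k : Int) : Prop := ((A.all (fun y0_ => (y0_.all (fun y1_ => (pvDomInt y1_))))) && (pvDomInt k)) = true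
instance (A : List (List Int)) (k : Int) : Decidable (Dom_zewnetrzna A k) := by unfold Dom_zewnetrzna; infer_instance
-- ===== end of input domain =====

-- B replaces A's per-combination per-column rescans by pruned recursive combination
-- generation over rows padded once, carrying an incremental running column-sum vector.

-- ===== PORT A =====
-- itertools.combinations(l, k) in lexicographic order, ported by hand
def pvCombos {α : Type} (l : List α) (k : Nat) : List (List α) :=
  match k, l with
  | 0, _ => [[]]
  | _ + 1, [] => []
  | k + 1, x :: xs => (pvCombos xs k).map (fun c => x :: c) ++ pvCombos xs (k + 1)

def zewnetrzna (A : List (List Int)) (k : Int) : List (List Int) :=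
  let maxLen : Nat := (A.map List.length).foldl max 0
  (pvCombos (PySem.List.pyRange 0 (A.length : Int) 1) k.toNat).map (fun komb =>
    (List.range maxLen).map (fun j =>
      komb.foldl (fun acc i =>
        acc + (let row := PySem.List.pyGetD A i []
               if j < row.length then PySem.List.pyGetD row (j : Int) 0 else 0)) 0))

-- ===== PORT B =====
def pvPad (m : Nat) (r : List Int) : List Int := r ++ List.replicate (m - r.length) 0

def pvAltRec (padded : List (List Int)) (i : Nat) (need : Nat) (cur : List Int) :
    List (List Int) :=
  if need = 0 then [cur]
  else if padded.length - i < need then []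
  else
    pvAltRec padded (i + 1) (need - 1) (List.zipWith (· + ·) cur (padded.getD i [])) ++
    pvAltRec padded (i + 1) need cur
termination_by padded.length - i
decreasing_by all_goals omega

def zewnetrzna_alt (A : List (List Int)) (k : Int) : List (List Int) :=
  let maxLen : Nat := (A.map List.length).foldl max 0
  let padded := A.map (pvPad maxLen)
  pvAltRec padded 0 k.toNat (List.replicate maxLen 0)

-- ===== PRECONDITION & SPEC =====
-- Pre_ excludes exactly the inputs on which Python A raises: A = [] (max() of an
-- empty sequence, ValueError) and k < 0 (itertools.combinations, ValueError).
def Pre_zewnetrzna (A : List (List Int)) (k : Int) : Prop := A ≠ [] ∧ 0 ≤ k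
instance (A : List (List Int)) (k : Int) : Decidable (Pre_zewnetrzna A k) := by
  unfold Pre_zewnetrzna; infer_instance

def pvWitness_zewnetrzna : List (List Int) × Int := ([[1, 2], [3], [4, 5, 6]], 2)

def Spec_zewnetrzna (A : List (List Int)) (k : Int) (out : List (List Int)) : Prop :=
  out = zewnetrzna_alt A k
instance (A : List (List Int)) (k : Int) (out : List (List Int)) :
    Decidable (Spec_zewnetrzna A k out) := by unfold Spec_zewnetrzna; infer_instance

-- ===== CLAIM (what is proved, stated in full; the proofs are below) =====
def Claim_equal_zewnetrzna : Prop := ∀ (A : List (List Int)) (k : Int),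
  Dom_zewnetrzna A k → Pre_zewnetrzna A k → Spec_zewnetrzna A k (zewnetrzna A k)

-- ===== LEMMAS AND PROOFS =====

lemma pvCombos_eq_nil {α : Type} (l : List α) (k : Nat) (h : l.length < k) :
    pvCombos l k = [] := by
  induction l generalizing k with
  | nil => cases k with
    | zero => omega
    | succ k => rfl
  | cons x xs ih =>
    cases k with
    | zero => omega
    | succ k =>
      have hx : xs.length < k := by simpa using h
      simp only [pvCombos]
      rw [ih k hx, ih (k + 1) (by omega)]
      rfl

lemma pvCombos_map {α β : Type} (f : α → β) (l : List α) (k : Nat) :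
    pvCombos (l.map f) k = (pvCombos l k).map (List.map f) := by
  induction l generalizing k with
  | nil => cases k <;> rfl
  | cons x xs ih =>
    cases k with
    | zero => rfl
    | succ k =>
      simp only [List.map_cons, pvCombos, ih, List.map_append, List.map_map]
      rfl

lemma pvCombos_subset {α : Type} {l : List α} {k : Nat} {c : List α}
    (hc : c ∈ pvCombos l k) : ∀ x ∈ c, x ∈ l := by
  induction l generalizing k c with
  | nil =>
    cases k with
    | zero => simp [pvCombos] at hc; simp [hc]
    | succ k => simp [pvCombos] at hc
  | cons y ys ih =>
    cases k with
    | zero =>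
      simp [pvCombos] at hc; simp [hc]
    | succ k =>
      simp only [pvCombos, List.mem_append, List.mem_map] at hc
      rcases hc with ⟨c', hc', rfl⟩ | hc
      · intro x hx
        rcases List.mem_cons.mp hx with rfl | hx
        · exact List.mem_cons_self
        · exact List.mem_cons_of_mem _ (ih hc' x hx)
      · intro x hx
        exact List.mem_cons_of_mem _ (ih hc x hx)

lemma pvPad_getD (m : Nat) (r : List Int) (j : Nat) :
    (pvPad m r).getD j 0 = r.getD j 0 := by
  unfold pvPad
  rcases Nat.lt_or_ge j r.length with h | h
  · rw [List.getD_append _ _ _ _ h]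
  · rw [List.getD_eq_getElem?_getD, List.getD_eq_getElem?_getD]
    rw [List.getElem?_append_right h, List.getElem?_replicate,
      List.getElem?_eq_none h]
    by_cases h2 : j - r.length < m - r.length <;> simp [h2]

lemma pvPad_length (m : Nat) (r : List Int) (h : r.length ≤ m) :
    (pvPad m r).length = m := by
  unfold pvPad; simp; omega

lemma range_map_getD {α β : Type} (l : List α) (d : α) (f : α → β) :
    (List.range l.length).map (fun i => f (l.getD i d)) = l.map f := by
  apply List.ext_getElem
  · simp
  · intro i h1 h2
    simp only [List.getElem_map, List.getElem_range]
    rw [List.getD_eq_getElem l d (by simpa using h2)]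

-- pointwise column sums of a list of length-m rows = fold of vector additions
lemma vec_fold_eq (m : Nat) (rows : List (List Int)) (cur : List Int)
    (hcur : cur.length = m) (hrows : ∀ r ∈ rows, r.length = m) :
    rows.foldl (fun c r => List.zipWith (· + ·) c r) cur
      = (List.range m).map (fun j => rows.foldl (fun acc r => acc + r.getD j 0) (cur.getD j 0)) := by
  induction rows generalizing cur with
  | nil =>
    simp only [List.foldl_nil]
    subst hcur
    have := range_map_getD cur 0 id
    simp only [List.map_id] at this
    exact this.symm
  | cons r rs ih =>
    have hr : r.length = m := hrows r List.mem_cons_self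
    have hlen : (List.zipWith (· + ·) cur r).length = m := by simp [hcur, hr]
    simp only [List.foldl_cons]
    rw [ih _ hlen (fun r' hr' => hrows r' (List.mem_cons_of_mem _ hr'))]
    apply List.map_congr_left
    intro j hj
    have hj' : j < m := List.mem_range.mp hj
    have : (List.zipWith (· + ·) cur r).getD j 0 = cur.getD j 0 + r.getD j 0 := by
      rw [List.getD_eq_getElem _ _ (by omega), List.getD_eq_getElem _ _ (by omega),
        List.getD_eq_getElem _ _ (by omega), List.getElem_zipWith]
    rw [this]

lemma pvAltRec_eq (padded : List (List Int)) (i : Nat) (need : Nat) (cur : List Int) :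
    pvAltRec padded i need cur
      = (pvCombos (padded.drop i) need).map
          (fun sel => sel.foldl (fun c r => List.zipWith (· + ·) c r) cur) := by
  induction i, need, cur using pvAltRec.induct padded with
  | case1 i cur =>
    simp [pvAltRec, pvCombos]
  | case2 i need cur hne hlt =>
    rw [pvAltRec]
    have hdl : (padded.drop i).length < need := by simp; omega
    rw [pvCombos_eq_nil _ _ hdl]
    simp [hne, hlt]
  | case3 i need cur hne hge ih1 ih2 =>
    rw [pvAltRec]
    simp only [if_neg hne, if_neg hge]
    have hi : i < padded.length := by omega
    rw [ih1, ih2]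
    rw [List.drop_eq_getElem_cons hi]
    obtain ⟨n, rfl⟩ : ∃ n, need = n + 1 := ⟨need - 1, by omega⟩
    simp only [pvCombos, List.map_append, List.map_map]
    congr 1
    apply List.map_congr_left
    intro sel _
    simp [List.getElem?_eq_getElem hi]

-- A's per-combination row picked by Python index = padded row, columnwise
lemma le_foldl_max_len (A : List (List Int)) (r : List Int) (hr : r ∈ A) :
    r.length ≤ (A.map List.length).foldl max 0 :=
  (PySem.List.le_foldl_max (A.map List.length) 0).2 r.length (List.mem_map_of_mem hr)

-- ===== VERDICT (by name: the statement is the Claim_ definition above) =====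
theorem zewnetrzna_spec : Claim_equal_zewnetrzna := by
  intro A k _ _
  unfold Spec_zewnetrzna zewnetrzna zewnetrzna_alt
  set m : Nat := (A.map List.length).foldl max 0 with hm
  set k' : Nat := k.toNat
  -- B side
  rw [pvAltRec_eq, List.drop_zero]
  have hpad : A.map (pvPad m) = (List.range A.length).map (fun i => pvPad m (A.getD i [])) := by
    rw [range_map_getD]
  rw [hpad, pvCombos_map, List.map_map]
  -- A side
  rw [show ((A.length : Int)) = ((A.length : Nat) : Int) from rfl,
    PySem.List.pyRange_zero_nat, pvCombos_map, List.map_map]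
  apply List.map_congr_left
  intro komb hkomb
  have hsub : ∀ x ∈ komb, x ∈ List.range A.length := pvCombos_subset hkomb
  simp only [Function.comp]
  -- rewrite A's value: indices resolve to padded rows
  have hrows : ∀ r ∈ komb.map (fun i => pvPad m (A.getD i [])), r.length = m := by
    intro r hr
    rcases List.mem_map.mp hr with ⟨i, hi, rfl⟩
    have : i < A.length := List.mem_range.mp (hsub i hi)
    exact pvPad_length m _ (le_foldl_max_len A _ (by rw [List.getD_eq_getElem _ _ this]; exact List.getElem_mem this))
  rw [vec_fold_eq m _ (List.replicate m 0) (by simp) hrows]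
  apply List.map_congr_left
  intro j hj
  rw [List.foldl_map, List.foldl_map]
  have hz : (List.replicate m (0:Int)).getD j 0 = 0 := by
    rcases Nat.lt_or_ge j m with h | h
    · rw [List.getD_eq_getElem _ _ (by simpa using h)]; simp
    · rw [List.getD_eq_default]; simp; omega
  rw [hz]
  apply PySem.List.foldl_congr_mem
  intro acc i hi
  have hilt : i < A.length := List.mem_range.mp (hsub i hi)
  rw [PySem.List.pyGetD_natCast, PySem.List.pyGetD_natCast, pvPad_getD]
  rcases Nat.lt_or_ge j (A.getD i []).length with h | h
  · rw [if_pos h, List.getD_eq_getElem _ _ h]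
  · rw [if_neg (by omega), List.getD_eq_default _ _ h]
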